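-- pv_equiv track=rewrite | github.com/bigailabs/cathedralsubnet | src/cathedral/v3/export/datasets.py | _replace_on_word_boundary
-- ===== SOURCE A (Python) =====
-- def _is_word_char(c: str) -> bool:
--     return c.isalnum() or c == "_"
--
-- def _replace_on_word_boundary(haystack: str, needle: str, replacement: str) -> str:
--     """Replace `needle` in `haystack` only where it sits on a word
--     boundary on both sides.
--
--     A "word boundary" here is: the character immediately before/after
--     the match is not a word character (alnum or underscore). This
--     works for identifiers ("ZeroDivisionError" matches but
--     "MyZeroDivisionErrorWrapper" doesn't) AND for multi-word symptoms
--     ("division by zero" matches "raises division by zero." but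
--     leaves "subdivision by zero" alone because of the leading "sub").
--     """
--     if not needle or needle not in haystack:
--         return haystack
--     out_parts: list[str] = []
--     i = 0
--     nlen = len(needle)
--     while i < len(haystack):
--         j = haystack.find(needle, i)
--         if j == -1:
--             out_parts.append(haystack[i:])
--             break
--         before_ok = j == 0 or not _is_word_char(haystack[j - 1])
--         after_idx = j + nlen
--         after_ok = after_idx >= len(haystack) or not _is_word_char(haystack[after_idx])
--         out_parts.append(haystack[i:j])
--         if before_ok and after_ok:
--             out_parts.append(replacement)
--         else:
--             out_parts.append(needle)
--         i = j + nlen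
--     return "".join(out_parts)
-- ===== SOURCE B (Python) =====
-- def _is_word_char(c: str) -> bool:
--     return c.isalnum() or c == "_"
--
-- def _replace_on_word_boundary(haystack: str, needle: str, replacement: str) -> str:
--     """Split-based rewrite: cut haystack at the non-overlapping occurrences of
--     needle, then decide each gap from the neighbouring segments."""
--     if not needle:
--         return haystack
--     parts = haystack.split(needle)
--     pieces = [parts[0]]
--     for m in range(1, len(parts)):
--         left = parts[m - 1]
--         if left:
--             before_ok = not _is_word_char(left[-1])
--         elif m > 1:
--             before_ok = not _is_word_char(needle[-1])
--         else:
--             before_ok = True  # occurrence at the very start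
--         right = parts[m]
--         if right:
--             after_ok = not _is_word_char(right[0])
--         elif m < len(parts) - 1:
--             after_ok = not _is_word_char(needle[0])
--         else:
--             after_ok = True  # occurrence at the very end
--         pieces.append(replacement if before_ok and after_ok else needle)
--         pieces.append(right)
--     return "".join(pieces)
-- ===== Notes on version B (the rewrite author's own statement) =====
-- stated objective: alternative
-- what changed: B replaces A's index-based find-and-copy scanning loop with a single haystack.split(needle) pass and then decides each gap from the neighbouring segments, borrowing boundary characters from the needle itself when an adjacent segment is empty.
import Mathlib
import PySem

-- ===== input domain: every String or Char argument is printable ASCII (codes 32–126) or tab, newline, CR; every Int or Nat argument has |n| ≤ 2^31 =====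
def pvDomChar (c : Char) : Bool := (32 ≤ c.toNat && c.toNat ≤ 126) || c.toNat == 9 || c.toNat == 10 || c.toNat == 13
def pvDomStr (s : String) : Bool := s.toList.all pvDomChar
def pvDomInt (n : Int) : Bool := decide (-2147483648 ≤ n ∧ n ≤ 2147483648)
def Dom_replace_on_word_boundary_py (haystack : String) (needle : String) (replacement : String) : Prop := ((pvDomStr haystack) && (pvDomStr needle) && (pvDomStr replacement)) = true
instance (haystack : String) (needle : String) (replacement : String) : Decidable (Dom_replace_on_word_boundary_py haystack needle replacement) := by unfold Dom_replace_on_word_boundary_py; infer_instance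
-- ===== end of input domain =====

-- B replaces A's index/find scanning loop by one `haystack.split(needle)` pass whose gaps are
-- decided from the neighbouring segments (objective: alternative decomposition, same cost).

-- ===== PORT A =====

-- _is_word_char (same helper in Source A and Source B): c.isalnum() or c == "_"
def pvWord (c : Char) : Bool := PySem.Chars.isalnum c || (c == '_')

-- A's while-loop: state (i, out_parts); `hne : ns ≠ []` is only a termination guard
-- (A's loop runs only under the `not needle` guard).  The `.getD ' '`/`.getD []`
-- defaults are never hit: Python indexes haystack[j-1] only when j ≠ 0 (short-circuit `or`)
-- and haystack[after_idx] only when after_idx < len(haystack).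
def pvALoop (hs ns rs : List Char) (hne : ns ≠ []) (i : Nat) (acc : List (List Char)) :
    List (List Char) :=
  if hi : i < hs.length then
    -- j = haystack.find(needle, i)
    let j := PySem.Chars.findFrom hs ns (i : Int) none
    if hj : j = -1 then
      acc ++ [PySem.Chars.slice hs (some (i : Int)) none]        -- haystack[i:]
    else
      -- before_ok = j == 0 or not _is_word_char(haystack[j - 1])
      let before_ok := j == 0 || !pvWord (hs.getD (j.toNat - 1) ' ')
      let after_idx := j.toNat + ns.length
      -- after_ok = after_idx >= len(haystack) or not _is_word_char(haystack[after_idx])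
      let after_ok := decide (hs.length ≤ after_idx) || !pvWord (hs.getD after_idx ' ')
      pvALoop hs ns rs hne (j.toNat + ns.length)
        (acc ++ [PySem.Chars.slice hs (some (i : Int)) (some j)]  -- haystack[i:j]
             ++ [if before_ok && after_ok then rs else ns])
  else acc
termination_by hs.length - i
decreasing_by
  have hspec := PySem.Chars.findFrom_natCast_spec hs ns i (Nat.le_of_lt hi) hj
  have h1 : (i : Int) ≤ (PySem.Chars.findFrom hs ns (i : Int) none) := hspec.1
  have h2 : i ≤ (PySem.Chars.findFrom hs ns (i : Int) none).toNat := by omega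
  have h3 : 0 < ns.length := List.length_pos_iff.mpr hne
  omega

def replace_on_word_boundary_py (haystack : String) (needle : String) (replacement : String) : String :=
  -- if not needle or needle not in haystack: return haystack   (short-circuit `or` as two ifs)
  if hne : needle.toList = [] then haystack
  else if !(PySem.Str.isIn needle haystack) then haystack
  else
    String.ofList (PySem.Chars.join []
      (pvALoop haystack.toList needle.toList replacement.toList hne 0 []))

-- ===== PORT B =====

def replace_on_word_boundary_py_alt (haystack : String) (needle : String) (replacement : String) : String :=
  if needle.toList = [] then haystack
  else
    let hs := haystack.toList
    let ns := needle.toList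
    let rs := replacement.toList
    let parts := PySem.Chars.splitOn hs ns                        -- haystack.split(needle)
    -- pieces = [parts[0]]  (parts is never empty, the `.getD []` default is never hit)
    let pieces0 := [(PySem.List.pyGet? parts 0).getD []]
    -- for m in range(1, len(parts)): …  (all indexing below is in range, defaults never hit)
    let pieces := (PySem.List.pyRange 1 (parts.length : Int) 1).foldl (fun acc m =>
      let left := (PySem.List.pyGet? parts (m - 1)).getD []       -- parts[m - 1]
      let before_ok :=
        if left ≠ [] then !pvWord ((PySem.List.pyGet? left (-1)).getD ' ')   -- left[-1]
        else if 1 < m then !pvWord ((PySem.List.pyGet? ns (-1)).getD ' ')    -- needle[-1]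
        else true                                                 -- occurrence at the very start
      let right := (PySem.List.pyGet? parts m).getD []            -- parts[m]
      let after_ok :=
        if right ≠ [] then !pvWord ((PySem.List.pyGet? right 0).getD ' ')    -- right[0]
        else if m < (parts.length : Int) - 1 then !pvWord ((PySem.List.pyGet? ns 0).getD ' ')
        else true                                                 -- occurrence at the very end
      acc ++ [if before_ok && after_ok then rs else ns] ++ [right]) pieces0
    String.ofList (PySem.Chars.join [] pieces)                    -- "".join(pieces)

-- ===== PRECONDITION & SPEC =====
def Spec_replace_on_word_boundary_py (haystack : String) (needle : String) (replacement : String) (out : String) : Prop := out = replace_on_word_boundary_py_alt haystack needle replacement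
instance (haystack : String) (needle : String) (replacement : String) (out : String) : Decidable (Spec_replace_on_word_boundary_py haystack needle replacement out) := by unfold Spec_replace_on_word_boundary_py; infer_instance

-- ===== CLAIM (what is proved, stated in full; the proofs are below) =====
def Claim_equal_replace_on_word_boundary_py : Prop := ∀ (haystack : String) (needle : String) (replacement : String), Dom_replace_on_word_boundary_py haystack needle replacement → Spec_replace_on_word_boundary_py haystack needle replacement (replace_on_word_boundary_py haystack needle replacement)

-- ===== LEMMAS AND PROOFS =====

-- Structural form of Python's split on a non-empty separator (proof-side reference).
def pvSplit (ns : List Char) (s : List Char) : List (List Char) :=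
  if hne : ns = [] then [s]                                   -- unreachable guard
  else
    match hs : s with
    | [] => [[]]
    | c :: rest =>
      if ns.isPrefixOf s then [] :: pvSplit ns (s.drop ns.length)
      else
        match pvSplit ns rest with
        | [] => []                                            -- unreachable: pvSplit is never []
        | q :: qs => (c :: q) :: qs
termination_by s.length
decreasing_by
  · have : 0 < ns.length := List.length_pos_iff.mpr hne
    simp [hs]; omega
  · simp [hs]

-- Gap-by-gap gluing of the split parts (proof-side reference for both ports):
-- p is the character ending the text before the current part q (none = start of string).
def pvGlue (ns rs : List Char) (p : Option Char) (q : List Char) (parts : List (List Char)) :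
    List Char :=
  match parts with
  | [] => []
  | q' :: qs =>
    let before_ok := (if q = [] then p else some (q.getLastD ' ')).all (fun c => !pvWord c)
    let after_ok :=
      if q' = [] then (if qs = [] then true else !pvWord (ns.headD ' '))
      else !pvWord (q'.headD ' ')
    (if before_ok && after_ok then rs else ns) ++ q' ++ pvGlue ns rs (some (ns.getLastD ' ')) q' qs

theorem pvJoin_nil_eq_flatten (ps : List (List Char)) : PySem.Chars.join [] ps = ps.flatten := by
  show ([] : List Char).intercalate ps = ps.flatten
  unfold List.intercalate
  induction ps with
  | nil => rfl
  | cons q qs ih =>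
    cases qs with
    | nil => simp
    | cons b bs =>
      have h1 : List.intersperse ([] : List Char) (q :: b :: bs)
          = q :: [] :: List.intersperse [] (b :: bs) := rfl
      rw [h1]
      simp only [List.flatten_cons] at *
      rw [ih]; simp


theorem pvSplit_ne_nil (ns s : List Char) : pvSplit ns s ≠ [] := by
  fun_induction pvSplit ns s with
  | case1 => simp
  | case2 => simp
  | case3 h1 c rest h2 ih => simp_all [List.isPrefixOf_iff_prefix]
  | case4 h1 c rest h2 heq ih => simp_all [List.isPrefixOf_iff_prefix]
  | case5 h1 c rest q qs heq h2 ih => simp_all [List.isPrefixOf_iff_prefix]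

theorem pvSplit_no_occ (ns s : List Char) (hne : ns ≠ []) (h : ¬ ns <:+: s) :
    pvSplit ns s = [s] := by
  fun_induction pvSplit ns s <;>
    simp_all [List.isPrefixOf_iff_prefix, List.infix_cons_iff, pvSplit_ne_nil]

theorem pvSplit_jump (ns s : List Char) (hne : ns ≠ []) (h : 0 ≤ PySem.Chars.find s ns) :
    pvSplit ns s = s.take (PySem.Chars.find s ns).toNat ::
      pvSplit ns (s.drop ((PySem.Chars.find s ns).toNat + ns.length)) := by
  fun_induction pvSplit ns s with
  | case1 => simp_all
  | case2 hns =>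
    rw [PySem.Chars.find_nonneg_iff] at h
    simp_all
  | case3 hns c rest hpre ih =>
    obtain ⟨hocc, hmin⟩ := PySem.Chars.find_spec h
    have hj0 : (PySem.Chars.find (c :: rest) ns).toNat = 0 := by
      by_contra hc
      exact hmin 0 (by omega) (by simpa using List.isPrefixOf_iff_prefix.mp hpre)
    rw [hj0]
    simp [hpre]
  | case4 hns c rest heq hpre ih => exact absurd heq (pvSplit_ne_nil ns rest)
  | case5 hns c rest q qs heq hpre ih =>
    obtain ⟨hocc, hmin⟩ := PySem.Chars.find_spec h
    set j := (PySem.Chars.find (c :: rest) ns).toNat with hjdef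
    have hj1 : 1 ≤ j := by
      rcases Nat.eq_zero_or_pos j with h0 | h1'
      · rw [h0] at hocc
        simp only [List.drop_zero] at hocc
        exact absurd (List.isPrefixOf_iff_prefix.mpr hocc) hpre
      · exact h1'
    have hoccr : ns <+: rest.drop (j - 1) := by
      have hd : (c :: rest).drop j = rest.drop (j - 1) := by
        conv_lhs => rw [show j = (j - 1) + 1 by omega]
        simp
      rwa [hd] at hocc
    have hfr : 0 ≤ PySem.Chars.find rest ns := by
      rw [PySem.Chars.find_nonneg_iff]
      exact hoccr.isInfix.trans (List.drop_suffix _ _).isInfix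
    obtain ⟨hoccr', hminr⟩ := PySem.Chars.find_spec hfr
    have hjr : (PySem.Chars.find rest ns).toNat = j - 1 := by
      have hle : (PySem.Chars.find rest ns).toNat ≤ j - 1 := by
        by_contra hc
        exact hminr (j - 1) (by omega) hoccr
      have hge : j ≤ (PySem.Chars.find rest ns).toNat + 1 := by
        by_contra hc
        refine hmin ((PySem.Chars.find rest ns).toNat + 1) (by omega) ?_
        simpa using hoccr'
      omega
    have hsplit : pvSplit ns rest
        = rest.take (j - 1) :: pvSplit ns (rest.drop ((j - 1) + ns.length)) := by
      rw [ih hfr, hjr]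
    rw [hsplit] at heq
    injection heq with hq hqs
    simp only [List.isPrefixOf_iff_prefix] at hpre
    rw [if_neg (by simpa [List.isPrefixOf_iff_prefix] using hpre), hsplit]
    have ht : (c :: rest).take j = c :: rest.take (j - 1) := by
      conv_lhs => rw [show j = (j - 1) + 1 by omega]
      simp
    have hd2 : (c :: rest).drop (j + ns.length) = rest.drop ((j - 1) + ns.length) := by
      conv_lhs => rw [show j + ns.length = ((j - 1) + ns.length) + 1 by omega]
      simp
    rw [ht, hd2]

theorem pvSplit_nil_right (ns : List Char) (hne : ns ≠ []) : pvSplit ns [] = [[]] := by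
  simp [pvSplit, hne]

theorem pvSplit_cons_pos (ns : List Char) (c : Char) (rest : List Char) (hne : ns ≠ [])
    (hpre : ns <+: (c :: rest)) :
    pvSplit ns (c :: rest) = [] :: pvSplit ns ((c :: rest).drop ns.length) := by
  rw [pvSplit.eq_def]
  simp [hne, List.isPrefixOf_iff_prefix, hpre]

theorem pvSplit_cons_neg (ns : List Char) (c : Char) (rest : List Char) (q : List Char)
    (qs : List (List Char)) (hne : ns ≠ []) (hpre : ¬ ns <+: (c :: rest))
    (heq : pvSplit ns rest = q :: qs) :
    pvSplit ns (c :: rest) = (c :: q) :: qs := by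
  rw [pvSplit.eq_def]
  simp [hne, List.isPrefixOf_iff_prefix, hpre, heq]

theorem pvGo_eq (ns : List Char) (hne : ns ≠ []) :
    ∀ fuel l cur acc, l.length < fuel →
    PySem.Chars.splitOn.go ns fuel l cur acc =
      acc.reverse ++ ((cur.reverse ++ (pvSplit ns l).headD []) :: (pvSplit ns l).tail) := by
  intro fuel
  induction fuel with
  | zero => intro l cur acc hl; omega
  | succ f ih =>
    intro l cur acc hl
    cases l with
    | nil =>
      rw [PySem.Chars.splitOn.go, pvSplit_nil_right ns hne]
      · simp
      · omega
    | cons c rest =>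
      rw [PySem.Chars.splitOn.go]
      by_cases hpre : ns <+: (c :: rest)
      · rw [if_pos (List.isPrefixOf_iff_prefix.mpr hpre)]
        rw [ih _ _ _ (by
          have : 0 < ns.length := List.length_pos_iff.mpr hne
          simp only [List.length_drop, List.length_cons] at *
          omega)]
        rw [pvSplit_cons_pos ns c rest hne hpre]
        obtain ⟨q, qs, heq⟩ : ∃ q qs, pvSplit ns ((c :: rest).drop ns.length) = q :: qs := by
          cases hq : pvSplit ns ((c :: rest).drop ns.length) with
          | nil => exact absurd hq (pvSplit_ne_nil ns _)
          | cons a b => exact ⟨a, b, rfl⟩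
        rw [heq]
        simp
      · rw [if_neg (by simpa [List.isPrefixOf_iff_prefix] using hpre)]
        rw [ih _ _ _ (by simp at hl ⊢; omega)]
        obtain ⟨q, qs, heq⟩ : ∃ q qs, pvSplit ns rest = q :: qs := by
          cases hq : pvSplit ns rest with
          | nil => exact absurd hq (pvSplit_ne_nil ns rest)
          | cons a b => exact ⟨a, b, rfl⟩
        rw [pvSplit_cons_neg ns c rest q qs hne hpre heq, heq]
        simp

theorem pvSplitOn_eq (s ns : List Char) (hne : ns ≠ []) :
    PySem.Chars.splitOn s ns = pvSplit ns s := by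
  rw [PySem.Chars.splitOn]
  rw [pvGo_eq ns hne (s.length + 1) s [] [] (by omega)]
  obtain ⟨q, qs, heq⟩ : ∃ q qs, pvSplit ns s = q :: qs := by
    cases hq : pvSplit ns s with
    | nil => exact absurd hq (pvSplit_ne_nil ns s)
    | cons a b => exact ⟨a, b, rfl⟩
  rw [heq]
  simp

-- the character preceding position i of hs, as A's loop sees it
def pvPrev (hs : List Char) (i : Nat) : Option Char :=
  if i = 0 then none else some (hs.getD (i - 1) ' ')

theorem pvALoop_eq_glue (hs ns rs : List Char) (hne : ns ≠ []) :
    ∀ k i acc, hs.length - i ≤ k → i ≤ hs.length →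
    (pvALoop hs ns rs hne i acc).flatten =
      acc.flatten ++ (pvSplit ns (hs.drop i)).headD []
        ++ pvGlue ns rs (pvPrev hs i) ((pvSplit ns (hs.drop i)).headD [])
            (pvSplit ns (hs.drop i)).tail := by
  have hlp : 0 < ns.length := List.length_pos_iff.mpr hne
  intro k
  induction k with
  | zero =>
    intro i acc hk hle
    have hi : i = hs.length := by omega
    subst hi
    rw [pvALoop]
    simp [pvSplit_nil_right ns hne, pvGlue]
  | succ k ih =>
    intro i acc hk hle
    by_cases hi : i < hs.length
    · have hFeq := PySem.Chars.findFrom_natCast hs ns i hle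
      by_cases hf : PySem.Chars.find (hs.drop i) ns = -1
      · -- no further occurrence: A appends haystack[i:], split has a single part
        have hj : PySem.Chars.findFrom hs ns (i : Int) none = -1 := by
          rw [hFeq, if_pos hf]
        rw [pvALoop]
        simp only [dif_pos hi, dif_pos hj]
        have hni : ¬ ns <:+: hs.drop i := (PySem.Chars.find_eq_neg_one_iff _ _).mp hf
        rw [pvSplit_no_occ ns _ hne hni]
        simp [pvGlue, PySem.List.slice_from_natCast]
      · -- an occurrence at absolute position i + f
        have hf0 : 0 ≤ PySem.Chars.find (hs.drop i) ns := by
          have := PySem.Chars.neg_one_le_find (hs.drop i) ns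
          omega
        set f := (PySem.Chars.find (hs.drop i) ns).toNat with hfdef
        have hfI : PySem.Chars.find (hs.drop i) ns = (f : Int) :=
          (Int.toNat_of_nonneg hf0).symm
        have hFval : PySem.Chars.findFrom hs ns (i : Int) none = ((i + f : Nat) : Int) := by
          rw [hFeq, if_neg hf, hfI]
          push_cast
          ring
        have hspec := PySem.Chars.find_spec (s := hs.drop i) (sub := ns) hf0
        have hflen : f ≤ hs.length - i := by
          have h1 := PySem.Chars.find_le_length (hs.drop i) ns
          rw [hfI] at h1
          simp only [List.length_drop] at h1
          exact_mod_cast h1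
        have hocc : ns <+: hs.drop (i + f) := by
          have := hspec.1
          rw [← hfdef] at this
          rwa [List.drop_drop] at this
        obtain ⟨tl, htl⟩ := hocc
        have hlen2 : i + f + ns.length ≤ hs.length := by
          have := congrArg List.length htl
          simp only [List.length_append, List.length_drop] at this
          omega
        -- characters around the occurrence, seen from hs
        have hchar : ∀ m, m < ns.length → hs[i + f + m]? = ns[m]? := by
          intro m hm
          have h1 : (hs.drop (i + f))[m]? = hs[i + f + m]? := List.getElem?_drop
          rw [← h1, ← htl, List.getElem?_append_left hm]
        -- unfold one loop step
        rw [pvALoop]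
        simp only [dif_pos hi, hFval]
        have hne0 : ¬ (((i + f : Nat) : Int) = -1) := by
          intro hcon
          omega
        simp only [dif_neg hne0, Int.toNat_natCast]
        -- IH for the recursive call
        rw [ih (i + f + ns.length) _ (by omega) (by omega)]
        -- split of the current suffix
        have hjump := pvSplit_jump ns (hs.drop i) hne hf0
        rw [← hfdef, List.drop_drop] at hjump
        -- slice haystack[i:i+f] = (hs.drop i).take f
        have hslice : PySem.Chars.slice hs (some (i : Int)) (some ((i + f : Nat) : Int))
            = (hs.drop i).take f := by
          rw [PySem.Chars.slice_eq_listSlice]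
          push_cast
          exact PySem.List.slice_natCast_add hs i f
        obtain ⟨q', qs, hq'⟩ : ∃ q' qs, pvSplit ns (hs.drop (i + (f + ns.length))) = q' :: qs := by
          cases hq : pvSplit ns (hs.drop (i + (f + ns.length))) with
          | nil => exact absurd hq (pvSplit_ne_nil ns _)
          | cons a b => exact ⟨a, b, rfl⟩
        have harr : i + f + ns.length = i + (f + ns.length) := by omega
        rw [hjump]
        simp only [harr]
        rw [hq']
        simp only [List.headD_cons, List.tail_cons, List.flatten_append, List.flatten_cons,
          List.flatten_nil, List.append_nil, List.append_assoc, hslice]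
        rw [pvGlue]
        have hpv : pvPrev hs (i + (f + ns.length)) = some (ns.getLastD ' ') := by
          unfold pvPrev
          rw [if_neg (by omega)]
          congr 1
          rw [List.getD_eq_getElem?_getD, List.getLastD_eq_getLast?, List.getLast?_eq_getElem?]
          have hc := hchar (ns.length - 1) (by omega)
          rw [show i + (f + ns.length) - 1 = i + f + (ns.length - 1) by omega, hc]
        have hBok : ((if List.take f (List.drop i hs) = [] then pvPrev hs i
              else some ((List.take f (List.drop i hs)).getLastD ' ')).all fun c => !pvWord c)
            = ((((i + f : Nat) : Int) == 0) || !pvWord (hs.getD (i + f - 1) ' ')) := by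
          by_cases hfz : f = 0
          · simp only [hfz, List.take_zero, if_pos rfl, Nat.add_zero]
            by_cases hiz : i = 0
            · simp [pvPrev, hiz]
            · have hb : ((((i : Nat)) : Int) == 0) = false := by
                simp
                omega
              simp [pvPrev, hiz, hb]
          · have hq : (List.take f (List.drop i hs)) ≠ [] := by
              have hlq : (List.take f (List.drop i hs)).length = f := by
                simp only [List.length_take, List.length_drop]
                omega
              intro hcon
              rw [hcon] at hlq
              simp at hlq
              omega
            have hb : ((((i + f : Nat)) : Int) == 0) = false := by
              simp
              omega
            have hlast : (List.take f (List.drop i hs)).getLastD ' ' = hs.getD (i + f - 1) ' ' := by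
              rw [List.getLastD_eq_getLast?, List.getLast?_eq_getElem?, List.getD_eq_getElem?_getD]
              have hlen3 : (List.take f (List.drop i hs)).length = f := by
                simp only [List.length_take, List.length_drop]
                omega
              rw [hlen3, List.getElem?_take, if_pos (by omega), List.getElem?_drop]
              congr 2
              omega
            rw [if_neg hq]
            simp only [Option.all_some, hb, Bool.false_or]
            rw [hlast]
        have hAok : (if q' = [] then (if qs = [] then true else !pvWord (ns.headD ' '))
              else !pvWord (q'.headD ' '))
            = (decide (hs.length ≤ i + (f + ns.length)) || !pvWord (hs.getD (i + (f + ns.length)) ' ')) := by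
          by_cases hend : i + (f + ns.length) = hs.length
          · have ht' : hs.drop (i + (f + ns.length)) = [] := by
              rw [hend]
              exact List.drop_length
            rw [ht', pvSplit_nil_right ns hne] at hq'
            injection hq' with h1 h2
            subst h1; subst h2
            simp
            exact Or.inl (by omega)
          · have hlt : i + (f + ns.length) < hs.length := by omega
            have ht'ne : hs.drop (i + (f + ns.length)) ≠ [] := by
              intro hcon
              have := congrArg List.length hcon
              simp at this
              omega
            have hanot : ¬ hs.length ≤ i + (f + ns.length) := by omega
            have hhead : hs.getD (i + (f + ns.length)) ' '
                = (hs.drop (i + (f + ns.length))).headD ' ' := by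
              rw [List.headD_eq_head?, List.head?_drop, List.getD_eq_getElem?_getD]
            simp only [hanot, decide_false, Bool.false_or, hhead]
            by_cases hft : PySem.Chars.find (hs.drop (i + (f + ns.length))) ns = -1
            · have hsp := pvSplit_no_occ ns _ hne
                ((PySem.Chars.find_eq_neg_one_iff _ _).mp hft)
              rw [hsp] at hq'
              injection hq' with h1 h2
              subst h1; subst h2
              simp [ht'ne]
            · have hft0 : 0 ≤ PySem.Chars.find (hs.drop (i + (f + ns.length))) ns := by
                have := PySem.Chars.neg_one_le_find (hs.drop (i + (f + ns.length))) ns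
                omega
              have hjump2 := pvSplit_jump ns _ hne hft0
              rw [hjump2] at hq'
              injection hq' with h1 h2
              by_cases hfz2 : (PySem.Chars.find (hs.drop (i + (f + ns.length))) ns).toNat = 0
              · -- adjacent occurrence: the empty part borrows needle's first char
                rw [hfz2] at h1
                simp only [List.take_zero] at h1
                have hqs : qs ≠ [] := by
                  rw [← h2]
                  exact pvSplit_ne_nil ns _
                have hpre2 := (PySem.Chars.find_spec hft0).1
                rw [hfz2, List.drop_zero] at hpre2
                obtain ⟨u, hu⟩ := hpre2
                have hheads : (hs.drop (i + (f + ns.length))).headD ' ' = ns.headD ' ' := by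
                  rw [List.headD_eq_head?, List.headD_eq_head?, List.head?_eq_getElem?,
                    List.head?_eq_getElem?, ← hu, List.getElem?_append_left (by omega)]
                rw [hheads, ← h1]
                simp [hqs]
              · -- the next part is non-empty and starts right after the match
                have hq'ne : q' ≠ [] := by
                  rw [← h1]
                  intro hcon
                  have := congrArg List.length hcon
                  have hle4 := PySem.Chars.find_le_length (hs.drop (i + (f + ns.length))) ns
                  simp only [List.length_take, List.length_drop, List.length_nil] at this hle4
                  omega
                have hheads : q'.headD ' ' = (hs.drop (i + (f + ns.length))).headD ' ' := by
                  rw [List.headD_eq_head?, List.headD_eq_head?, ← h1, List.head?_eq_getElem?,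
                    List.head?_eq_getElem?, List.getElem?_take, if_pos (by omega)]
                rw [← hheads]
                simp [hq'ne]
        rw [hBok, hAok, hpv]
        simp [List.append_assoc]
    · have hi' : i = hs.length := by omega
      subst hi'
      rw [pvALoop]
      simp [pvSplit_nil_right ns hne, pvGlue]

theorem pvGet_neg_one {α : Type} (l : List α) (h : l ≠ []) :
    PySem.List.pyGet? l (-1) = l.getLast? := by
  have hl : 0 < l.length := List.length_pos_iff.mpr h
  simp only [PySem.List.pyGet?, PySem.List.pyIdx?]
  rw [if_neg (by omega), if_pos (by omega)]
  simp [List.getLast?_eq_getElem?]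

theorem pvGet_zero {α : Type} (l : List α) (h : l ≠ []) :
    PySem.List.pyGet? l 0 = l[0]? := by
  have hl : 0 < l.length := List.length_pos_iff.mpr h
  simp only [PySem.List.pyGet?, PySem.List.pyIdx?]
  rw [if_pos (by omega), if_pos (by omega)]
  simp

theorem pvBFold_eq_glue (hs ns rs : List Char) (hne : ns ≠ []) :
    ∀ rest q (m : Nat) pieces p, 1 ≤ m →
    (pvSplit ns hs).drop (m - 1) = q :: rest →
    p = (if m = 1 then none else some (ns.getLastD ' ')) →
    ((PySem.List.pyRange (m : Int) ((pvSplit ns hs).length : Int) 1).foldl (fun acc mm =>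
      let left := (PySem.List.pyGet? (pvSplit ns hs) (mm - 1)).getD []
      let before_ok :=
        if left ≠ [] then !pvWord ((PySem.List.pyGet? left (-1)).getD ' ')
        else if 1 < mm then !pvWord ((PySem.List.pyGet? ns (-1)).getD ' ')
        else true
      let right := (PySem.List.pyGet? (pvSplit ns hs) mm).getD []
      let after_ok :=
        if right ≠ [] then !pvWord ((PySem.List.pyGet? right 0).getD ' ')
        else if mm < ((pvSplit ns hs).length : Int) - 1 then !pvWord ((PySem.List.pyGet? ns 0).getD ' ')
        else true
      acc ++ [if before_ok && after_ok then rs else ns] ++ [right]) pieces).flatten =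
      pieces.flatten ++ pvGlue ns rs p q rest := by
  intro rest
  induction rest with
  | nil =>
    intro q m pieces p hm hdrop hp
    have hlen : (pvSplit ns hs).length = m := by
      have := congrArg List.length hdrop
      simp only [List.length_drop, List.length_cons, List.length_nil] at this
      have hlt : m - 1 < (pvSplit ns hs).length := by
        by_contra hc
        rw [List.drop_eq_nil_of_le (by omega)] at hdrop
        simp at hdrop
      omega
    rw [hlen, PySem.List.pyRange_one_eq_nil (by omega)]
    simp [pvGlue]
  | cons q' qs ihr =>
    intro q m pieces p hm hdrop hp
    have hlen : (pvSplit ns hs).length = m + 1 + qs.length := by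
      have := congrArg List.length hdrop
      simp only [List.length_drop, List.length_cons] at this
      have hlt : m - 1 < (pvSplit ns hs).length := by
        by_contra hc
        rw [List.drop_eq_nil_of_le (by omega)] at hdrop
        simp at hdrop
      omega
    have hq : (pvSplit ns hs)[m - 1]? = some q := by
      have h0 : ((pvSplit ns hs).drop (m - 1))[0]? = some q := by
        rw [hdrop]; rfl
      rwa [List.getElem?_drop, Nat.add_zero] at h0
    have hq' : (pvSplit ns hs)[m]? = some q' := by
      have h1 : ((pvSplit ns hs).drop (m - 1))[1]? = some q' := by
        rw [hdrop]; rfl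
      rwa [List.getElem?_drop, show m - 1 + 1 = m by omega] at h1
    have hdrop' : (pvSplit ns hs).drop ((m + 1) - 1) = q' :: qs := by
      have : (pvSplit ns hs).drop m = ((pvSplit ns hs).drop (m - 1)).drop 1 := by
        rw [List.drop_drop]
        congr 1
        omega
      rw [show (m + 1) - 1 = m from rfl, this, hdrop]
      rfl
    rw [PySem.List.pyRange_one_cons (by rw [hlen]; push_cast; omega), List.foldl_cons]
    have hm1 : (m : Int) - 1 = ((m - 1 : Nat) : Int) := by push_cast; omega
    simp only [hm1, PySem.List.pyGet?_natCast, hq, Option.getD_some]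
    rw [show ((m : Int)) = (((m : Nat)) : Int) from rfl]
    simp only [PySem.List.pyGet?_natCast, hq', Option.getD_some]
    rw [show ((m : Int)) + 1 = (((m + 1 : Nat)) : Int) by push_cast; ring]
    rw [ihr q' (m + 1) _ (some (ns.getLastD ' ')) (by omega) hdrop' (by rw [if_neg (by omega)])]
    rw [pvGlue]
    -- match up the decision booleans
    have hbok : (if q ≠ [] then !pvWord ((PySem.List.pyGet? q (-1)).getD ' ')
          else if 1 < ((m : Nat) : Int) then !pvWord ((PySem.List.pyGet? ns (-1)).getD ' ')
          else true)
        = ((if q = [] then p else some (q.getLastD ' ')).all fun c => !pvWord c) := by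
      by_cases hqe : q = []
      · simp only [hqe, ne_eq, not_true_eq_false, if_false, if_pos rfl]
        by_cases hm1' : m = 1
        · rw [hp, if_pos hm1', hm1']
          simp
        · rw [hp, if_neg hm1', if_pos (by omega)]
          rw [pvGet_neg_one ns hne, ← List.getLastD_eq_getLast?]
          simp
      · simp [hqe, pvGet_neg_one q hqe, List.getLastD_eq_getLast?]
    have haok : (if q' ≠ [] then !pvWord ((PySem.List.pyGet? q' 0).getD ' ')
          else if ((m : Nat) : Int) < ((pvSplit ns hs).length : Int) - 1 then !pvWord ((PySem.List.pyGet? ns 0).getD ' ')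
          else true)
        = (if q' = [] then (if qs = [] then true else !pvWord (ns.headD ' '))
           else !pvWord (q'.headD ' ')) := by
      by_cases hq'e : q' = []
      · by_cases hqs : qs = []
        · have hno : ¬ (((m : Nat) : Int) < ((pvSplit ns hs).length : Int) - 1) := by
            rw [hlen, hqs]
            simp
          simp [hq'e, hqs, hno]
        · have hyes : (((m : Nat) : Int) < ((pvSplit ns hs).length : Int) - 1) := by
            have hq0 : 0 < qs.length := List.length_pos_iff.mpr hqs
            rw [hlen]
            push_cast
            omega
          simp [hq'e, hqs, hyes, pvGet_zero ns hne, List.headD_eq_head?, List.head?_eq_getElem?]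
      · simp [hq'e, pvGet_zero q' hq'e, List.headD_eq_head?, List.head?_eq_getElem?]
    rw [hbok, haok]
    simp [List.append_assoc]

-- ===== VERDICT (by name: the statement is the Claim_ definition above) =====
theorem replace_on_word_boundary_py_spec : Claim_equal_replace_on_word_boundary_py := by
  intro haystack needle replacement _
  unfold Spec_replace_on_word_boundary_py
  unfold replace_on_word_boundary_py replace_on_word_boundary_py_alt
  by_cases hn : needle.toList = []
  · simp [hn]
  · simp only [dif_neg hn, if_neg hn]
    have hnsne : needle.toList ≠ [] := hn
    set hs := haystack.toList with hhs
    set ns := needle.toList with hns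
    set rs := replacement.toList with hrs
    obtain ⟨q0, t0, hparts⟩ : ∃ q0 t0, pvSplit ns hs = q0 :: t0 := by
      cases hq : pvSplit ns hs with
      | nil => exact absurd hq (pvSplit_ne_nil ns hs)
      | cons a b => exact ⟨a, b, rfl⟩
    have hget0 : (PySem.List.pyGet? (pvSplit ns hs) 0).getD [] = q0 := by
      rw [pvGet_zero _ (pvSplit_ne_nil ns hs), hparts]
      rfl
    -- the B side evaluates to parts[0] ++ glued gaps
    have hBeq : ((PySem.List.pyRange 1 ((pvSplit ns hs).length : Int) 1).foldl (fun acc m =>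
          let left := (PySem.List.pyGet? (pvSplit ns hs) (m - 1)).getD []
          let before_ok :=
            if left ≠ [] then !pvWord ((PySem.List.pyGet? left (-1)).getD ' ')
            else if 1 < m then !pvWord ((PySem.List.pyGet? ns (-1)).getD ' ')
            else true
          let right := (PySem.List.pyGet? (pvSplit ns hs) m).getD []
          let after_ok :=
            if right ≠ [] then !pvWord ((PySem.List.pyGet? right 0).getD ' ')
            else if m < ((pvSplit ns hs).length : Int) - 1 then !pvWord ((PySem.List.pyGet? ns 0).getD ' ')
            else true
          acc ++ [if before_ok && after_ok then rs else ns] ++ [right]) [q0]).flatten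
        = q0 ++ pvGlue ns rs none q0 t0 := by
      have hfold := pvBFold_eq_glue hs ns rs hnsne t0 q0 1 [q0] none (by omega)
        (by simpa using hparts) (by simp)
      exact hfold.trans (by simp)
    by_cases hin : PySem.Str.isIn needle haystack = true
    · -- needle occurs: A runs its loop, which glues the very same split
      rw [hin]
      rw [if_neg (by simp)]
      congr 1
      rw [pvJoin_nil_eq_flatten, pvJoin_nil_eq_flatten, pvSplitOn_eq hs ns hnsne, hget0]
      rw [hBeq]
      rw [pvALoop_eq_glue hs ns rs _ hs.length 0 [] (by omega) (by omega)]
      rw [List.drop_zero] at *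
      rw [hparts]
      simp [pvPrev]
    · -- needle absent: the split is a single part and B glues nothing
      have hfalse : PySem.Str.isIn needle haystack = false := by
        cases h : PySem.Str.isIn needle haystack
        · rfl
        · exact absurd h hin
      rw [hfalse]
      rw [if_pos (by simp)]
      rw [pvJoin_nil_eq_flatten, pvSplitOn_eq hs ns hnsne, hget0, hBeq]
      have hni : ¬ ns <:+: hs := by
        rw [PySem.Str.isIn_eq] at hfalse
        exact (PySem.Chars.isIn_eq_false_iff ns hs).mp hfalse
      have hsp := pvSplit_no_occ ns hs hnsne hni
      rw [hsp] at hparts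
      injection hparts with h1 h2
      rw [← h1, ← h2]
      simp [pvGlue, hhs, String.ofList_toList]
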